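-- pv_equiv track=rewrite | github.com/TimotheAlbouy/MemoMix | other/memomix_lite.py | check_entry_validity
-- ===== SOURCE A (Python) =====
-- def check_entry_validity(entry: dict):
--     """
--     Check that all person IDs appear only once in the entry.
--
--     :param entry: the entry to check
--     :return: True if the entry is valid, False otherwise
--     """
--     person_ids = set()
--     for group in entry.values():
--         for person_id in group:
--             if person_id in person_ids:
--                 return False
--             person_ids.add(person_id)
--     return True
-- ===== SOURCE B (Python) =====
-- def check_entry_validity(entry: dict):
--     """
--     Check that all person IDs appear only once in the entry.
--
--     :param entry: the entry to check
--     :return: True if the entry is valid, False otherwise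
--     """
--     all_ids = sorted(pid for group in entry.values() for pid in group)
--     return all(a != b for a, b in zip(all_ids, all_ids[1:]))
-- ===== Notes on version B (the rewrite author's own statement) =====
-- stated objective: alternative
-- what changed: Replaced the incrementally maintained seen-set with early return by sorting the flattened ID list and checking that no two adjacent elements are equal; no set is used at all.
import Mathlib
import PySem

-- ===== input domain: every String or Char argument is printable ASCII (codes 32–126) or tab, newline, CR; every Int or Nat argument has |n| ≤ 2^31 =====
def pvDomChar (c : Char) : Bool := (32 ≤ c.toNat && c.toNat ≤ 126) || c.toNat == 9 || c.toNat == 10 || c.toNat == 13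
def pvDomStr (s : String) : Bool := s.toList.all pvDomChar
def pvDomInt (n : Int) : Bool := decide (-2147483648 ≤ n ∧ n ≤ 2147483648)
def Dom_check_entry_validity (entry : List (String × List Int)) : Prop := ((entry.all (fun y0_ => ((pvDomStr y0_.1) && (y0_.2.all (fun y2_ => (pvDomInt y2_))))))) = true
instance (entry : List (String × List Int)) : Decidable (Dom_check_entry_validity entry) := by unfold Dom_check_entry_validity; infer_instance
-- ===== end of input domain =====

-- B sorts the flattened ID list and checks no two adjacent elements are equal (no set, no early return).

-- ===== PORT A =====
-- inner loop: 'for person_id in group: if person_id in person_ids: return False; person_ids.add(person_id)'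
-- (none signals the early 'return False')
def pvCheckGroup (seen : PySem.Set Int) : List Int → Option (PySem.Set Int)
  | [] => some seen
  | p :: ps =>
    if PySem.Set.contains seen p then none
    else pvCheckGroup (PySem.Set.add seen p) ps

-- outer loop: 'for group in entry.values(): …'
def pvGoA (seen : PySem.Set Int) : List (String × List Int) → Bool
  | [] => true
  | (_, g) :: rest =>
    match pvCheckGroup seen g with
    | none => false
    | some seen' => pvGoA seen' rest

def check_entry_validity (entry : List (String × List Int)) : Bool :=
  pvGoA PySem.Set.empty entry

-- ===== PORT B =====
def check_entry_validity_alt (entry : List (String × List Int)) : Bool :=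
  let all_ids := PySem.List.sorted (entry.flatMap (fun group => group.2)) (fun x => x) false
  (all_ids.zip (PySem.List.slice all_ids (some 1) none)).all (fun p => p.1 != p.2)

-- ===== PRECONDITION & SPEC =====
def Spec_check_entry_validity (entry : List (String × List Int)) (out : Bool) : Prop := out = check_entry_validity_alt entry
instance (entry : List (String × List Int)) (out : Bool) : Decidable (Spec_check_entry_validity entry out) := by unfold Spec_check_entry_validity; infer_instance

-- ===== CLAIM (what is proved, stated in full; the proofs are below) =====
def Claim_equal_check_entry_validity : Prop := ∀ (entry : List (String × List Int)), Dom_check_entry_validity entry → Spec_check_entry_validity entry (check_entry_validity entry)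

-- ===== LEMMAS AND PROOFS =====

-- A's inner loop succeeds (returning seen extended by the group) iff the group has no repeat and is fresh w.r.t. seen
theorem pvCheckGroup_eq (g : List Int) (s : PySem.Set Int) :
    pvCheckGroup s g = if g.Nodup ∧ ∀ x ∈ g, x ∉ s then some (s ++ g) else none := by
  induction g generalizing s with
  | nil => simp [pvCheckGroup]
  | cons p ps ih =>
    rw [pvCheckGroup]
    by_cases hp : p ∈ s
    · rw [if_pos (by simp [hp]), if_neg (by rintro ⟨-, h2⟩; exact h2 p (by simp) hp)]
    · rw [if_neg (by simp [hp]), PySem.Set.add_of_not_mem hp, ih]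
      have hiff : (ps.Nodup ∧ ∀ x ∈ ps, x ∉ s ++ [p]) ↔
          ((p :: ps).Nodup ∧ ∀ x ∈ p :: ps, x ∉ s) := by
        constructor
        · rintro ⟨h1, h2⟩
          refine ⟨List.nodup_cons.mpr ⟨fun hm => (h2 p hm) (by simp), h1⟩, ?_⟩
          intro x hx
          rcases List.mem_cons.mp hx with rfl | hx
          · exact hp
          · exact fun hxs => h2 x hx (List.mem_append.mpr (Or.inl hxs))
        · rintro ⟨h1, h2⟩
          obtain ⟨hpps, hps⟩ := List.nodup_cons.mp h1
          refine ⟨hps, fun x hx hxm => ?_⟩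
          rcases List.mem_append.mp hxm with hxs | hxp
          · exact h2 x (List.mem_cons_of_mem _ hx) hxs
          · exact hpps ((List.mem_singleton.mp hxp) ▸ hx)
      by_cases hc : ps.Nodup ∧ ∀ x ∈ ps, x ∉ s ++ [p]
      · rw [if_pos hc, if_pos (hiff.mp hc)]; simp
      · rw [if_neg hc, if_neg (fun h => hc (hiff.mpr h))]

theorem pvGoA_eq (l : List (String × List Int)) (s : PySem.Set Int) (hs : s.Nodup) :
    pvGoA s l = decide ((s ++ l.flatMap (fun g => g.2)).Nodup) := by
  induction l generalizing s with
  | nil => simp [pvGoA, hs]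
  | cons hd rest ih =>
    obtain ⟨k, g⟩ := hd
    rw [pvGoA, pvCheckGroup_eq]
    by_cases hc : g.Nodup ∧ ∀ x ∈ g, x ∉ s
    · rw [if_pos hc]
      have hsg : (s ++ g).Nodup := by
        rw [List.nodup_append]
        refine ⟨hs, hc.1, ?_⟩
        intro a ha b hb heq
        exact hc.2 b hb (heq ▸ ha)
      show pvGoA (s ++ g) rest = _
      rw [ih (s ++ g) hsg]
      simp [List.append_assoc]
    · rw [if_neg hc]
      show false = _
      have hneg : ¬ (s ++ (g ++ rest.flatMap (fun g => g.2))).Nodup := by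
        intro hnd
        have hsub : (s ++ g).Sublist (s ++ (g ++ rest.flatMap (fun g => g.2))) := by
          rw [← List.append_assoc]; exact List.sublist_append_left _ _
        have hsg := List.Nodup.sublist hsub hnd
        rw [List.nodup_append] at hsg
        exact hc ⟨hsg.2.1, fun x hxg hxs => hsg.2.2 x hxs x hxg rfl⟩
      simp only [List.flatMap_cons]
      simp [hneg]

-- B's adjacent-pair scan computes IsChain (≠)
theorem pvZipAllNe : ∀ (s : List Int),
    ((s.zip (s.drop 1)).all (fun p => p.1 != p.2)) = decide (List.IsChain (fun a b => a ≠ b) s)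
  | [] => by simp
  | [a] => by simp
  | a :: b :: t => by
    have ih := pvZipAllNe (b :: t)
    simp only [List.drop_one, List.tail_cons, List.zip_cons_cons, List.all_cons,
      List.isChain_cons_cons] at *
    rw [ih]
    by_cases h : a = b <;> simp [h]

-- on a (≤)-sorted list, adjacent distinctness is exactly Nodup
theorem pvChainNodup : ∀ (s : List Int), s.Pairwise (· ≤ ·) →
    (List.IsChain (fun a b => a ≠ b) s ↔ s.Nodup)
  | [], _ => by simp
  | [a], _ => by simp
  | a :: b :: t, hp => by
    obtain ⟨h1, h2⟩ := List.pairwise_cons.mp hp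
    have ih := pvChainNodup (b :: t) h2
    rw [List.isChain_cons_cons, ih]
    constructor
    · rintro ⟨hab, hnd⟩
      refine List.nodup_cons.mpr ⟨?_, hnd⟩
      intro hmem
      have hab' : a < b := lt_of_le_of_ne (h1 b (by simp)) hab
      rcases List.mem_cons.mp hmem with rfl | hmem'
      · exact absurd rfl (ne_of_lt hab')
      · exact absurd hab' (not_lt.mpr ((List.pairwise_cons.mp h2).1 a hmem'))
    · intro hnd
      obtain ⟨hna, hnd'⟩ := List.nodup_cons.mp hnd
      exact ⟨fun heq => hna (heq ▸ List.mem_cons_self), hnd'⟩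

-- ===== VERDICT (by name: the statement is the Claim_ definition above) =====
theorem check_entry_validity_spec : Claim_equal_check_entry_validity := by
  intro entry _
  unfold Spec_check_entry_validity check_entry_validity
  rw [pvGoA_eq entry PySem.Set.empty (by simp [PySem.Set.empty])]
  have halt : check_entry_validity_alt entry =
      ((PySem.List.sorted (entry.flatMap (fun g => g.2)) (fun x => x) false).zip
        (PySem.List.slice (PySem.List.sorted (entry.flatMap (fun g => g.2)) (fun x => x) false)
          (some 1) none)).all (fun p => p.1 != p.2) := rfl
  have h1 : PySem.List.slice (PySem.List.sorted (entry.flatMap (fun g => g.2)) (fun x => x) false)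
      (some 1) none = (PySem.List.sorted (entry.flatMap (fun g => g.2)) (fun x => x) false).drop 1 := by
    simpa using PySem.List.slice_from_natCast
      (xs := PySem.List.sorted (entry.flatMap (fun g => g.2)) (fun x => x) false) (a := 1)
  rw [halt, h1, pvZipAllNe, decide_eq_decide,
    pvChainNodup _ (by simpa using PySem.List.sorted_pairwise (entry.flatMap (fun g => g.2)) (fun x => x))]
  have hperm := PySem.List.sorted_perm (entry.flatMap (fun g => g.2)) (fun x => x) false
  simp [hperm.nodup_iff, PySem.Set.empty]
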